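-- pv_equiv track=rewrite | github.com/MauricioCifuentes2000/arq_proy | arq_proy.py | restricted_complement
-- ===== SOURCE A (Python) =====
-- def restricted_complement(binary_str):
--     """
--     Calcula el complemento restringido de un número binario.
--     Suposicion: El primer bit es el bit de signo y no se invierte.
--     """
--     if not all(c in '01' for c in binary_str):
--         return "Error: La entrada no es un numero binario valido."
--
--     if len(binary_str) == 0:
--         return "Error: Entrada vacia."
--
--     # El primer bit (bit de signo) permanece igual
--     sign_bit = binary_str[0]
--     # Invertir los demás bits
--     complemented_bits = ''.join('1' if bit == '0' else '0' for bit in binary_str[1:])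
--     return sign_bit + complemented_bits
-- ===== SOURCE B (Python) =====
-- def restricted_complement(binary_str):
--     if not all(c in '01' for c in binary_str):
--         return "Error: La entrada no es un numero binario valido."
--     if len(binary_str) == 0:
--         return "Error: Entrada vacia."
--     n = len(binary_str) - 1
--     if n == 0:
--         return binary_str
--     v = (1 << n) - 1 - int(binary_str[1:], 2)
--     return binary_str[0] + format(v, '0{}b'.format(n))
-- ===== Notes on version B (the rewrite author's own statement) =====
-- stated objective: alternative
-- what changed: Replaces the per-character flip loop over the tail with a closed-form arithmetic complement: parse the tail as an integer, subtract it from 2^n-1, and re-format it as a zero-padded width-n binary string.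
import Mathlib
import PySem

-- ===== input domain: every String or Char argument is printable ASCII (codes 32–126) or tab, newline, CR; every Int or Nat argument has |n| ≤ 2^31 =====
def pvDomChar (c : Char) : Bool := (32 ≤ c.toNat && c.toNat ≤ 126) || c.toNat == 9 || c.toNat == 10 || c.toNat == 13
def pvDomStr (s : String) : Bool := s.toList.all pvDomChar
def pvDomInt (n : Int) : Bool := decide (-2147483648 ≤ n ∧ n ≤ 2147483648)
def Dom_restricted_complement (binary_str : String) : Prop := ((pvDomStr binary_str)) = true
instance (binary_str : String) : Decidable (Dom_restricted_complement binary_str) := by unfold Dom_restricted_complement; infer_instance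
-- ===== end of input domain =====

-- B replaces A's per-character flip loop by a closed-form arithmetic complement:
-- v = (1<<n) - 1 - int(tail, 2), zero-padded back to width n (objective: alternative).

-- ===== PORT A =====
def restricted_complement (binary_str : String) : String :=
  let l := binary_str.toList
  if ¬ (l.all fun c => c == '0' || c == '1') then
    "Error: La entrada no es un numero binario valido."
  else if l.length == 0 then
    "Error: Entrada vacia."
  else
    -- sign_bit = binary_str[0]; flip each bit of binary_str[1:]
    String.ofList (l.take 1 ++ (l.drop 1).map (fun bit => if bit == '0' then '1' else '0'))

-- ===== PORT B =====
-- int(s, 2) on a '01'-string: hand port, exact on that domain (value is nonnegative)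
def pvParseBin (l : List Char) : Nat :=
  l.foldl (fun a c => 2 * a + (if c == '1' then 1 else 0)) 0

-- format(v, '0{n}b'): hand port, exact for 0 ≤ v < 2^n (the only values B feeds it)
def pvPadBin : Nat → Nat → List Char
  | 0, _ => []
  | k + 1, v => pvPadBin k (v / 2) ++ [if v % 2 == 1 then '1' else '0']

def restricted_complement_alt (binary_str : String) : String :=
  let l := binary_str.toList
  if ¬ (l.all fun c => c == '0' || c == '1') then
    "Error: La entrada no es un numero binario valido."
  else if l.length == 0 then
    "Error: Entrada vacia."
  else
    let n := l.length - 1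
    if n == 0 then binary_str
    else
      let v := (2 ^ n - 1) - pvParseBin (l.drop 1)
      String.ofList (l.take 1 ++ pvPadBin n v)

-- ===== PRECONDITION & SPEC =====
def Spec_restricted_complement (binary_str : String) (out : String) : Prop := out = restricted_complement_alt binary_str
instance (binary_str : String) (out : String) : Decidable (Spec_restricted_complement binary_str out) := by unfold Spec_restricted_complement; infer_instance

-- ===== CLAIM (what is proved, stated in full; the proofs are below) =====
def Claim_equal_restricted_complement : Prop := ∀ (binary_str : String), Dom_restricted_complement binary_str → Spec_restricted_complement binary_str (restricted_complement binary_str)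

-- ===== LEMMAS AND PROOFS =====

theorem pvParseBin_append (l : List Char) (c : Char) :
    pvParseBin (l ++ [c]) = 2 * pvParseBin l + (if c == '1' then 1 else 0) := by
  simp [pvParseBin, List.foldl_append]

theorem pvParseBin_lt (l : List Char)
    (h : ∀ c ∈ l, c = '0' ∨ c = '1') : pvParseBin l < 2 ^ l.length := by
  induction l using List.reverseRecOn with
  | nil => simp [pvParseBin]
  | append_singleton l c ih =>
    have hp := ih (fun x hx => h x (by simp [hx]))
    have : (if c == '1' then 1 else 0) ≤ 1 := by split <;> omega
    rw [pvParseBin_append]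
    simp only [List.length_append, List.length_singleton, pow_succ]
    omega

theorem pvPadBin_complement (l : List Char)
    (h : ∀ c ∈ l, c = '0' ∨ c = '1') :
    pvPadBin l.length (2 ^ l.length - 1 - pvParseBin l)
      = l.map (fun bit => if bit == '0' then '1' else '0') := by
  induction l using List.reverseRecOn with
  | nil => simp [pvPadBin]
  | append_singleton l c ih =>
    have hmem : ∀ x ∈ l, x = '0' ∨ x = '1' := fun x hx => h x (by simp [hx])
    have hp : pvParseBin l < 2 ^ l.length := pvParseBin_lt l hmem
    set n := l.length with hn
    set p := pvParseBin l with hpdef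
    set b : Nat := if c == '1' then 1 else 0 with hb
    have hlen : (l ++ [c]).length = n + 1 := by simp [hn]
    have hparse : pvParseBin (l ++ [c]) = 2 * p + b := pvParseBin_append l c
    rw [hlen, hparse]
    have hb1 : b ≤ 1 := by rw [hb]; split <;> omega
    have hv : 2 ^ (n + 1) - 1 - (2 * p + b) = 2 * (2 ^ n - 1 - p) + (1 - b) := by
      rw [pow_succ]; omega
    rw [hv]
    show pvPadBin (n + 1) _ = _
    rw [pvPadBin]
    have hdiv : (2 * (2 ^ n - 1 - p) + (1 - b)) / 2 = 2 ^ n - 1 - p := by omega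
    have hmod : (2 * (2 ^ n - 1 - p) + (1 - b)) % 2 = 1 - b := by omega
    rw [hdiv, hmod, ih hmem]
    rcases h c (by simp) with hc | hc <;>
      simp [hc] at hb ⊢ <;> simp [hb]

theorem restricted_complement_spec : Claim_equal_restricted_complement := by
  intro s _
  show restricted_complement s = restricted_complement_alt s
  unfold restricted_complement restricted_complement_alt
  set l := s.toList with hl
  by_cases hall : (l.all fun c => c == '0' || c == '1') = true
  · simp only [hall]
    by_cases hlen : l.length = 0
    · simp [hlen]
    · simp only [hlen, beq_iff_eq, if_false]
      have hmem : ∀ c ∈ l.drop 1, c = '0' ∨ c = '1' := by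
        intro c hc
        have := List.all_eq_true.mp hall c (List.mem_of_mem_drop hc)
        simpa [Bool.or_eq_true, beq_iff_eq] using this
      by_cases hn : l.length - 1 = 0
      · -- length 1: tail empty, B returns the string itself
        have h1 : l.length = 1 := by omega
        simp only [hn, if_true]
        have hd : l.drop 1 = [] := List.eq_nil_of_length_eq_zero (by simp [h1])
        rw [hd]
        simp only [List.map_nil, List.append_nil]
        have ht : l.take 1 = l := List.take_of_length_le (by omega)
        rw [ht, hl, String.ofList_toList]
      · simp only [hn, reduceIte]
        have hdl : (l.drop 1).length = l.length - 1 := by simp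
        have key := pvPadBin_complement (l.drop 1) hmem
        rw [hdl] at key
        simp only [beq_iff_eq] at key ⊢
        rw [key]
  · simp [hall]
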